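-- pv_equiv track=rewrite | github.com/Minoo7/TDDE24 | tenta/2019_08_20/cod.py | find_least_close_i
-- ===== SOURCE A (Python) =====
-- def find_least_close_i(seq1, seq2):
--     new_list = []
--     furth = seq2[0]
--     for num in seq1:
--         for compare in seq2[1:]:
--             comp_val1, comp_val2 = abs(num-compare), abs(num-furth)
--             if comp_val1 > comp_val2 or (comp_val1 == comp_val2 and compare > furth):
--                 furth = compare
--         new_list.append(furth)
--     return new_list
-- ===== SOURCE B (Python) =====
-- def find_least_close_i(seq1, seq2):
--     # O(len(seq1)+len(seq2)): the farthest candidate in seq2[1:] is always its min or max,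
--     # so precompute them once and compare only those two per element (carrying furth over).
--     furth = seq2[0]
--     tail = seq2[1:]
--     if tail:
--         mn, mx = min(tail), max(tail)
--     out = []
--     for num in seq1:
--         if tail:
--             for c in (mn, mx):
--                 if abs(num - c) > abs(num - furth) or (abs(num - c) == abs(num - furth) and c > furth):
--                     furth = c
--         out.append(furth)
--     return out
-- ===== Notes on version B (the rewrite author's own statement) =====
-- stated objective: faster
-- what changed: Replaced the full inner scan of seq2[1:] per element by a one-time precomputation of min(seq2[1:]) and max(seq2[1:]): the farthest value (with the larger-on-tie rule) is always one of these two extremes, compared against the carried furth in O(1) per element.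
import Mathlib
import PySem

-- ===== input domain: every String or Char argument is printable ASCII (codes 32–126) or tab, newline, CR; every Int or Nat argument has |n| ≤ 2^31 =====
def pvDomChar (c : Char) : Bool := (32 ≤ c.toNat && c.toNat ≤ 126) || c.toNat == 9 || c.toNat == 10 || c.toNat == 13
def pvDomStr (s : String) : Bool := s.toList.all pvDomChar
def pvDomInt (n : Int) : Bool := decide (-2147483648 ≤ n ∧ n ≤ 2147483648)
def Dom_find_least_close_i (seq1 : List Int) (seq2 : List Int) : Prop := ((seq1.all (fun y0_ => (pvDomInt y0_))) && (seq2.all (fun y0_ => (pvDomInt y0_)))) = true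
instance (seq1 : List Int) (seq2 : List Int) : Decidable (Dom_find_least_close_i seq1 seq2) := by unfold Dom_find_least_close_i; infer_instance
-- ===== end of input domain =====

-- B replaces A's full scan of seq2[1:] per element by a one-time min/max of seq2[1:]:
-- the farthest candidate is always one of these two extremes (objective: asymptotically faster).

-- ===== PORT A =====
-- Literal port of A: for each num, scan all of seq2[1:] updating the carried furth.
-- seq2[1:] is exactly List.drop 1; seq2[0] raises IndexError on [] (excluded by Pre_).
def find_least_close_i (seq1 : List Int) (seq2 : List Int) : List Int :=
  let furth0 : Int := ((PySem.List.pyGet? seq2 0).getD 0)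
  (seq1.foldl (fun (st : List Int × Int) num =>
    let furth := (seq2.drop 1).foldl (fun furth compare =>
      if |num - compare| > |num - furth| ∨ (|num - compare| = |num - furth| ∧ compare > furth)
      then compare else furth) st.2
    (st.1 ++ [furth], furth)) ([], furth0)).1

-- ===== PORT B =====
-- the update `if better then c else furth` of Source B's inner two-candidate loop
def fliStep (num furth c : Int) : Int :=
  if |num - c| > |num - furth| ∨ (|num - c| = |num - furth| ∧ c > furth) then c else furth

def find_least_close_i_alt (seq1 : List Int) (seq2 : List Int) : List Int :=
  let furth0 : Int := ((PySem.List.pyGet? seq2 0).getD 0)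
  let tail := seq2.drop 1
  let mn? := PySem.List.min? tail (fun x => x)
  let mx? := PySem.List.max? tail (fun x => x)
  (seq1.foldl (fun (st : List Int × Int) num =>
    let furth := match mn?, mx? with
      | some mn, some mx => fliStep num (fliStep num st.2 mn) mx
      | _, _ => st.2
    (st.1 ++ [furth], furth)) ([], furth0)).1

-- ===== PRECONDITION & SPEC =====
-- Pre_ excludes only seq2 = [], on which the Python A (and B) raise IndexError at seq2[0].
def Pre_find_least_close_i (seq1 : List Int) (seq2 : List Int) : Prop := seq2 ≠ []
instance (seq1 : List Int) (seq2 : List Int) : Decidable (Pre_find_least_close_i seq1 seq2) := by unfold Pre_find_least_close_i; infer_instance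
def pvWitness_find_least_close_i : List Int × List Int := ([1, -3, 4], [0, 5, -2])

def Spec_find_least_close_i (seq1 : List Int) (seq2 : List Int) (out : List Int) : Prop := out = find_least_close_i_alt seq1 seq2
instance (seq1 : List Int) (seq2 : List Int) (out : List Int) : Decidable (Spec_find_least_close_i seq1 seq2 out) := by unfold Spec_find_least_close_i; infer_instance

-- ===== CLAIM (what is proved, stated in full; the proofs are below) =====
def Claim_equal_find_least_close_i : Prop := ∀ (seq1 : List Int) (seq2 : List Int), Dom_find_least_close_i seq1 seq2 → Pre_find_least_close_i seq1 seq2 → Spec_find_least_close_i seq1 seq2 (find_least_close_i seq1 seq2)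

-- ===== LEMMAS AND PROOFS =====

-- "x is no better a candidate than y for num": the (distance, value) key of x is ≤ that of y
def fliLe (num x y : Int) : Prop := |num - x| < |num - y| ∨ (|num - x| = |num - y| ∧ x ≤ y)

lemma fliLe_refl (num x : Int) : fliLe num x x := Or.inr ⟨rfl, le_refl x⟩

lemma fliLe_trans {num x y z : Int} (h1 : fliLe num x y) (h2 : fliLe num y z) : fliLe num x z := by
  unfold fliLe at *
  rcases h1 with h1 | ⟨h1, h1'⟩ <;> rcases h2 with h2 | ⟨h2, h2'⟩ <;> omega

lemma fliLe_antisymm {num x y : Int} (h1 : fliLe num x y) (h2 : fliLe num y x) : x = y := by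
  unfold fliLe at *; omega

lemma fliStep_mem (num f c : Int) : fliStep num f c = f ∨ fliStep num f c = c := by
  unfold fliStep; split <;> simp

lemma fliLe_step_left (num f c : Int) : fliLe num f (fliStep num f c) := by
  unfold fliStep fliLe; split
  · omega
  · exact Or.inr ⟨rfl, le_refl f⟩

lemma fliLe_step_right (num f c : Int) : fliLe num c (fliStep num f c) := by
  unfold fliStep fliLe; split
  · exact Or.inr ⟨rfl, le_refl c⟩
  · omega

-- r is the optimum of the candidate list l under the key (|num-·|, ·)
def fliBest (num : Int) (l : List Int) (r : Int) : Prop := r ∈ l ∧ ∀ x ∈ l, fliLe num x r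

lemma fliBest_unique {num : Int} {l : List Int} {r1 r2 : Int}
    (h1 : fliBest num l r1) (h2 : fliBest num l r2) : r1 = r2 :=
  fliLe_antisymm (h2.2 r1 h1.1) (h1.2 r2 h2.1)

-- A's inner loop computes the optimum of f :: l
lemma foldl_fliBest (num : Int) (l : List Int) : ∀ f, fliBest num (f :: l)
    (l.foldl (fun furth compare =>
      if |num - compare| > |num - furth| ∨ (|num - compare| = |num - furth| ∧ compare > furth)
      then compare else furth) f) := by
  induction l with
  | nil => intro f; exact ⟨List.mem_singleton.mpr rfl, fun x hx => by
      rw [List.mem_singleton] at hx; rw [hx]; exact fliLe_refl num f⟩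
  | cons c t ih =>
    intro f
    have hstep : (fun furth compare =>
        if |num - compare| > |num - furth| ∨ (|num - compare| = |num - furth| ∧ compare > furth)
        then compare else furth) f c = fliStep num f c := rfl
    simp only [List.foldl_cons, hstep]
    obtain ⟨hmem, hbd⟩ := ih (fliStep num f c)
    rw [List.mem_cons] at hmem
    constructor
    · rcases hmem with h | h
      · rcases fliStep_mem num f c with h2 | h2 <;> rw [h, h2] <;> simp
      · simp [h]
    · intro x hx
      rw [List.mem_cons, List.mem_cons] at hx
      rcases hx with h | h | h
      · rw [h]; exact fliLe_trans (fliLe_step_left num f c) (hbd _ List.mem_cons_self)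
      · rw [h]; exact fliLe_trans (fliLe_step_right num f c) (hbd _ List.mem_cons_self)
      · exact hbd x (List.mem_cons_of_mem _ h)

-- any value between mn and mx is no better than mn or no better than mx
lemma fliLe_extreme {num x mn mx : Int} (h1 : mn ≤ x) (h2 : x ≤ mx) :
    fliLe num x mn ∨ fliLe num x mx := by
  unfold fliLe; simp only [Int.abs_eq_natAbs]; omega

-- B's two-candidate update computes the same optimum of f :: l
lemma stepB_fliBest (num f : Int) (l : List Int) {mn mx : Int}
    (hmn : PySem.List.min? l (fun x => x) = some mn)
    (hmx : PySem.List.max? l (fun x => x) = some mx) :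
    fliBest num (f :: l) (fliStep num (fliStep num f mn) mx) := by
  have hmnm := PySem.List.min?_mem hmn
  have hmxm := PySem.List.max?_mem hmx
  have hmnle := PySem.List.min?_isMin hmn
  have hmxle := PySem.List.max?_isMax hmx
  constructor
  · rcases fliStep_mem num (fliStep num f mn) mx with h | h
    · rw [h]
      rcases fliStep_mem num f mn with h2 | h2 <;> rw [h2]
      · simp
      · exact List.mem_cons_of_mem _ hmnm
    · rw [h]; exact List.mem_cons_of_mem _ hmxm
  · intro x hx
    rw [List.mem_cons] at hx
    rcases hx with h | h
    · rw [h]; exact fliLe_trans (fliLe_step_left num f mn) (fliLe_step_left num _ mx)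
    · rcases fliLe_extreme (num := num) (hmnle x h) (hmxle x h) with hc | hc
      · exact fliLe_trans hc (fliLe_trans (fliLe_step_right num f mn) (fliLe_step_left num _ mx))
      · exact fliLe_trans hc (fliLe_step_right num _ mx)

-- per-element agreement of the two inner computations
lemma inner_eq (num f : Int) (l : List Int) :
    (l.foldl (fun furth compare =>
      if |num - compare| > |num - furth| ∨ (|num - compare| = |num - furth| ∧ compare > furth)
      then compare else furth) f)
    = (match PySem.List.min? l (fun x => x), PySem.List.max? l (fun x => x) with
       | some mn, some mx => fliStep num (fliStep num f mn) mx
       | _, _ => f) := by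
  cases hl : l with
  | nil => simp [PySem.List.min?, PySem.List.max?]
  | cons a t =>
    obtain ⟨mn, hmn⟩ : ∃ mn, PySem.List.min? (a :: t) (fun x => x) = some mn := by
      cases h : PySem.List.min? (a :: t) (fun x => x) with
      | none => exact absurd ((PySem.List.min?_eq_none_iff _ _).mp h) (by simp)
      | some mn => exact ⟨mn, rfl⟩
    obtain ⟨mx, hmx⟩ : ∃ mx, PySem.List.max? (a :: t) (fun x => x) = some mx := by
      cases h : PySem.List.max? (a :: t) (fun x => x) with
      | none => exact absurd ((PySem.List.max?_eq_none_iff _ _).mp h) (by simp)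
      | some mx => exact ⟨mx, rfl⟩
    rw [hmn, hmx]
    exact fliBest_unique (foldl_fliBest num (a :: t) f) (stepB_fliBest num f (a :: t) hmn hmx)

lemma outer_eq (seq1 : List Int) (tail : List Int) : ∀ (st : List Int × Int),
    seq1.foldl (fun (st : List Int × Int) num =>
      let furth := tail.foldl (fun furth compare =>
        if |num - compare| > |num - furth| ∨ (|num - compare| = |num - furth| ∧ compare > furth)
        then compare else furth) st.2
      (st.1 ++ [furth], furth)) st
    = seq1.foldl (fun (st : List Int × Int) num =>
      let furth := match PySem.List.min? tail (fun x => x), PySem.List.max? tail (fun x => x) with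
        | some mn, some mx => fliStep num (fliStep num st.2 mn) mx
        | _, _ => st.2
      (st.1 ++ [furth], furth)) st := by
  induction seq1 with
  | nil => intro st; rfl
  | cons a t ih =>
    intro st
    simp only [List.foldl_cons]
    rw [inner_eq a st.2 tail]
    exact ih _

-- ===== VERDICT (by name: the statement is the Claim_ definition above) =====
theorem find_least_close_i_spec : Claim_equal_find_least_close_i := by
  intro seq1 seq2 _ _
  unfold Spec_find_least_close_i find_least_close_i find_least_close_i_alt
  simp only []
  rw [outer_eq]
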